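-- pv_equiv track=rewrite | github.com/pmareke/katas | tiered_pricing/src/main.py | unit_price
-- ===== SOURCE A (Python) =====
-- MINIMUM_UNIT_PRICE = 149
--
-- def unit_price(subscription_index: int) -> int:
--     unit_price_by_number_of_subscriptions = [
--         {
--             "min": 1,
--             "max": 2,
--             "unit_price": 299
--         },
--         {
--             "min": 3,
--             "max": 10,
--             "unit_price": 239
--         },
--         {
--             "min": 11,
--             "max": 25,
--             "unit_price": 219
--         },
--         {
--             "min": 26,
--             "max": 50,
--             "unit_price": 199
--         },
--     ]
--
--     for entry in unit_price_by_number_of_subscriptions: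
--         if subscription_index in range(entry["min"], entry["max"] + 1):
--             return entry["unit_price"]
--     return MINIMUM_UNIT_PRICE
-- ===== SOURCE B (Python) =====
-- MINIMUM_UNIT_PRICE = 149
--
-- _TIERS = [(1, 2, 299), (3, 10, 239), (11, 25, 219), (26, 50, 199)]
--
-- # expand the four tiers once into a per-count price table
-- _TABLE = {}
-- for _lo, _hi, _price in _TIERS:
--     for _n in range(_lo, _hi + 1):
--         _TABLE[_n] = _price
--
--
-- def unit_price(subscription_index: int) -> int:
--     return _TABLE.get(subscription_index, MINIMUM_UNIT_PRICE)
-- ===== Notes on version B (the rewrite author's own statement) =====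
-- stated objective: idiomatic
-- what changed: Replaces the per-call scan over tier dicts with per-entry range membership tests by a module-level dict expanded once from the tiers, so each call is a single table lookup with default.
import Mathlib
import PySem

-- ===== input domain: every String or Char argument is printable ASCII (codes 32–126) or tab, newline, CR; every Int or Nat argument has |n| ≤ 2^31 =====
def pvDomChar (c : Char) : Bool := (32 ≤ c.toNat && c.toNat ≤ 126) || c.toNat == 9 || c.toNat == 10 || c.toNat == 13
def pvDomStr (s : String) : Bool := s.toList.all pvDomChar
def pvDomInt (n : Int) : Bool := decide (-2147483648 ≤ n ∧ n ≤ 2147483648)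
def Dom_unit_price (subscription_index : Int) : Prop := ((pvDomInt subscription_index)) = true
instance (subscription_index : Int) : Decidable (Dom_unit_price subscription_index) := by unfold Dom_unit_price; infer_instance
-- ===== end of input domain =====

-- B replaces A's per-call scan of tier dicts (with `in range` tests) by a dict
-- expanded once from the tiers, looked up with a default (objective: idiomatic).

-- ===== PORT A =====
def pvTiersA : List (PySem.Dict String Int) :=
  [ PySem.Dict.mk [("min", 1), ("max", 2), ("unit_price", 299)],
    PySem.Dict.mk [("min", 3), ("max", 10), ("unit_price", 239)],
    PySem.Dict.mk [("min", 11), ("max", 25), ("unit_price", 219)],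
    PySem.Dict.mk [("min", 26), ("max", 50), ("unit_price", 199)] ]

-- the `for entry in …: if …: return` loop, first match wins
def pvLoopA (entries : List (PySem.Dict String Int)) (n : Int) : Int :=
  match entries with
  | [] => 149
  | e :: rest =>
      if n ∈ PySem.List.pyRange (e.getD "min" 0) (e.getD "max" 0 + 1) 1 then
        e.getD "unit_price" 0
      else pvLoopA rest n

def unit_price (subscription_index : Int) : Int :=
  pvLoopA pvTiersA subscription_index

-- ===== PORT B =====
def pvTiersB : List (Int × Int × Int) :=
  [(1, 2, 299), (3, 10, 239), (11, 25, 219), (26, 50, 199)]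

-- the module-level table: for lo,hi,price in tiers: for n in range(lo,hi+1): table[n] = price
def pvTableB : PySem.Dict Int Int :=
  pvTiersB.foldl
    (fun d t =>
      (PySem.List.pyRange t.1 (t.2.1 + 1) 1).foldl (fun d' n => d'.insert n t.2.2) d)
    PySem.Dict.empty

def unit_price_alt (subscription_index : Int) : Int :=
  pvTableB.getD subscription_index 149

-- ===== PRECONDITION & SPEC =====
def Spec_unit_price (subscription_index : Int) (out : Int) : Prop := out = unit_price_alt subscription_index
instance (subscription_index : Int) (out : Int) : Decidable (Spec_unit_price subscription_index out) := by unfold Spec_unit_price; infer_instance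

-- ===== CLAIM (what is proved, stated in full; the proofs are below) =====
def Claim_equal_unit_price : Prop := ∀ (subscription_index : Int), Dom_unit_price subscription_index → Spec_unit_price subscription_index (unit_price subscription_index)

-- ===== LEMMAS AND PROOFS =====

-- lookup after inserting a constant price over a contiguous range
theorem getD_foldl_insert_pyRange (a b p x dflt : Int) (d : PySem.Dict Int Int) :
    ((PySem.List.pyRange a b 1).foldl (fun d' n => d'.insert n p) d).getD x dflt
      = if a ≤ x ∧ x < b then p else d.getD x dflt := by
  by_cases hab : a < b
  · have hm : (b - (a + 1)).toNat < (b - a).toNat := by omega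
    rw [PySem.List.pyRange_one_cons hab, List.foldl_cons,
        getD_foldl_insert_pyRange (a + 1) b p x dflt, PySem.Dict.getD_insert]
    split_ifs <;> first | rfl | omega
  · rw [PySem.List.pyRange_one_eq_nil (by omega)]
    split_ifs <;> first | rfl | omega
termination_by (b - a).toNat
decreasing_by omega

theorem unit_price_eq_alt (n : Int) : unit_price n = unit_price_alt n := by
  have h1 : (PySem.Dict.mk [("min",(1:Int)),("max",2),("unit_price",299)]).getD "min" 0 = 1 := by decide
  have h2 : (PySem.Dict.mk [("min",(1:Int)),("max",2),("unit_price",299)]).getD "max" 0 = 2 := by decide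
  have h3 : (PySem.Dict.mk [("min",(1:Int)),("max",2),("unit_price",299)]).getD "unit_price" 0 = 299 := by decide
  have h4 : (PySem.Dict.mk [("min",(3:Int)),("max",10),("unit_price",239)]).getD "min" 0 = 3 := by decide
  have h5 : (PySem.Dict.mk [("min",(3:Int)),("max",10),("unit_price",239)]).getD "max" 0 = 10 := by decide
  have h6 : (PySem.Dict.mk [("min",(3:Int)),("max",10),("unit_price",239)]).getD "unit_price" 0 = 239 := by decide
  have h7 : (PySem.Dict.mk [("min",(11:Int)),("max",25),("unit_price",219)]).getD "min" 0 = 11 := by decide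
  have h8 : (PySem.Dict.mk [("min",(11:Int)),("max",25),("unit_price",219)]).getD "max" 0 = 25 := by decide
  have h9 : (PySem.Dict.mk [("min",(11:Int)),("max",25),("unit_price",219)]).getD "unit_price" 0 = 219 := by decide
  have h10 : (PySem.Dict.mk [("min",(26:Int)),("max",50),("unit_price",199)]).getD "min" 0 = 26 := by decide
  have h11 : (PySem.Dict.mk [("min",(26:Int)),("max",50),("unit_price",199)]).getD "max" 0 = 50 := by decide
  have h12 : (PySem.Dict.mk [("min",(26:Int)),("max",50),("unit_price",199)]).getD "unit_price" 0 = 199 := by decide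
  unfold unit_price unit_price_alt pvTableB pvTiersB
  simp only [List.foldl_cons, List.foldl_nil, getD_foldl_insert_pyRange,
    PySem.Dict.getD_empty]
  simp only [pvLoopA, pvTiersA, h1, h2, h3, h4, h5, h6, h7, h8, h9, h10, h11, h12,
    PySem.List.mem_pyRange_one]
  split_ifs <;> omega

-- ===== VERDICT (by name: the statement is the Claim_ definition above) =====
theorem unit_price_spec : Claim_equal_unit_price := by
  intro n _
  exact unit_price_eq_alt n
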